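-- pv_equiv track=rewrite | github.com/BitR1ft/UniVex | backend/app/agent/tools/idor_tools.py | _is_access_denied
-- ===== SOURCE A (Python) =====
-- def _is_access_denied(status: int, body: str) -> bool:
--     """Return True if the response indicates an access denial."""
--     if status in (401, 403, 404):
--         return True
--     denial_markers = (
--         "access denied", "forbidden", "unauthorized", "not found",
--         "not allowed", "not authorized", "permission denied",
--     )
--     return any(m in body.lower() for m in denial_markers)
-- ===== SOURCE B (Python) =====
-- def _is_access_denied(status: int, body: str) -> bool:
--     """Return True if the response indicates an access denial."""
--     if status in (401, 403, 404):
--         return True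
--     markers = (
--         "access denied", "forbidden", "unauthorized", "not found",
--         "not allowed", "not authorized", "permission denied",
--     )
--     lowered = body.lower()
--     for i in range(len(lowered)):
--         if any(lowered.startswith(m, i) for m in markers):
--             return True
--     return False
-- ===== Notes on version B (the rewrite author's own statement) =====
-- stated objective: alternative
-- what changed: Instead of running a separate substring search over the lowered body for each of the 7 denial markers, B lowers the body once and makes a single left-to-right pass over its positions, testing at each position whether any marker starts there.
import Mathlib
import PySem

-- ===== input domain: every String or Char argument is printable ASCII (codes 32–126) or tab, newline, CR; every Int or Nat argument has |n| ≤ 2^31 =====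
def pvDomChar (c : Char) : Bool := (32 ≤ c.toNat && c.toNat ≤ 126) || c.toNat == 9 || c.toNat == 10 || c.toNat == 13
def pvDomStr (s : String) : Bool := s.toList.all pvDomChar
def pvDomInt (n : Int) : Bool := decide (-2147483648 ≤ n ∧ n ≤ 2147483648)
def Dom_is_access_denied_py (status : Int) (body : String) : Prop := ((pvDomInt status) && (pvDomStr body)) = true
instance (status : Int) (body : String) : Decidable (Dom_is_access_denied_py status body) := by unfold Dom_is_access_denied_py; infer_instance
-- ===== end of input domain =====

-- B lowers the body once and makes a single pass over its positions, testing whether any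
-- denial marker starts at each position, instead of A's per-marker substring scans (alternative).


-- ===== PORT A =====
def pvMarkers : List String :=
  ["access denied", "forbidden", "unauthorized", "not found",
   "not allowed", "not authorized", "permission denied"]

def is_access_denied_py (status : Int) (body : String) : Bool :=
  if status = 401 ∨ status = 403 ∨ status = 404 then true
  else pvMarkers.any (fun m => PySem.Str.isIn m (PySem.Str.lower body))

-- ===== PORT B =====
def pvMarkersAlt : List String :=
  ["access denied", "forbidden", "unauthorized", "not found",
   "not allowed", "not authorized", "permission denied"]

-- any(lowered.startswith(m, i) for m in markers) at the current position
def pvAnyMarkerAt (s : List Char) : Bool :=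
  pvMarkersAlt.any (fun m => m.toList.isPrefixOf s)

-- the for-loop over i in range(len(lowered)): one step per position
def pvScan : List Char → Bool
  | [] => false
  | c :: t => pvAnyMarkerAt (c :: t) || pvScan t

def is_access_denied_py_alt (status : Int) (body : String) : Bool :=
  if status = 401 ∨ status = 403 ∨ status = 404 then true
  else pvScan (PySem.Chars.lower body.toList)

-- ===== PRECONDITION & SPEC =====
def Spec_is_access_denied_py (status : Int) (body : String) (out : Bool) : Prop := out = is_access_denied_py_alt status body
instance (status : Int) (body : String) (out : Bool) : Decidable (Spec_is_access_denied_py status body out) := by unfold Spec_is_access_denied_py; infer_instance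

-- ===== CLAIM (what is proved, stated in full; the proofs are below) =====
def Claim_equal_is_access_denied_py : Prop := ∀ (status : Int) (body : String), Dom_is_access_denied_py status body → Spec_is_access_denied_py status body (is_access_denied_py status body)

-- ===== LEMMAS AND PROOFS =====

theorem pvScan_iff (s : List Char) :
    pvScan s = true ↔ ∃ m ∈ pvMarkersAlt, m.toList <:+: s := by
  induction s with
  | nil =>
    simp only [pvScan, List.infix_nil]
    constructor
    · intro h; exact absurd h (by decide)
    · rintro ⟨m, hm, hnil⟩
      fin_cases hm <;> simp_all
  | cons c t ih =>
    simp only [pvScan, Bool.or_eq_true, pvAnyMarkerAt, List.any_eq_true,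
      List.isPrefixOf_iff_prefix, ih, List.infix_cons_iff]
    constructor
    · rintro (⟨m, hm, hp⟩ | ⟨m, hm, hi⟩)
      · exact ⟨m, hm, Or.inl hp⟩
      · exact ⟨m, hm, Or.inr hi⟩
    · rintro ⟨m, hm, hp | hi⟩
      · exact Or.inl ⟨m, hm, hp⟩
      · exact Or.inr ⟨m, hm, hi⟩

-- ===== VERDICT (by name: the statement is the Claim_ definition above) =====
theorem is_access_denied_py_spec : Claim_equal_is_access_denied_py := by
  intro status body _
  unfold Spec_is_access_denied_py is_access_denied_py is_access_denied_py_alt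
  split
  · rfl
  · rw [Bool.eq_iff_iff]
    simp only [List.any_eq_true, PySem.Str.isIn_iff_infix, PySem.Str.toList_lower,
      pvScan_iff, pvMarkers, pvMarkersAlt]
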